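-- pv_equiv track=rewrite | github.com/alaframa/AWSIntanceMonitoring | domain.py | get_custom_block_indices
-- ===== SOURCE A (Python) =====
-- BEGIN_TAG = '#custom-my-ap-begin'
--
-- END_TAG = '#custom-my-ap-end'
--
-- def get_custom_block_indices(lines):
--     """Find the indices of the custom block in the hosts file."""
--     begin_index = None
--     end_index = None
--     for i, line in enumerate(lines):
--         if BEGIN_TAG in line:
--             begin_index = i
--         if END_TAG in line:
--             end_index = i
--             break
--     return begin_index, end_index
-- ===== SOURCE B (Python) =====
-- BEGIN_TAG = '#custom-my-ap-begin'
--
-- END_TAG = '#custom-my-ap-end'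
--
-- def get_custom_block_indices(lines):
--     """Find the indices of the custom block in the hosts file."""
--     end_index = next((i for i, line in enumerate(lines) if END_TAG in line), None)
--     upper = len(lines) - 1 if end_index is None else end_index
--     begin_index = next((i for i in range(upper, -1, -1) if BEGIN_TAG in lines[i]), None)
--     return begin_index, end_index
-- ===== Notes on version B (the rewrite author's own statement) =====
-- stated objective: alternative
-- what changed: A's single forward pass that keeps overwriting begin_index is replaced by two generator-based searches: next() over enumerate for the first END_TAG line, then next() over a backward range from that line (or the list end) for the nearest preceding BEGIN_TAG line.
import Mathlib
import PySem

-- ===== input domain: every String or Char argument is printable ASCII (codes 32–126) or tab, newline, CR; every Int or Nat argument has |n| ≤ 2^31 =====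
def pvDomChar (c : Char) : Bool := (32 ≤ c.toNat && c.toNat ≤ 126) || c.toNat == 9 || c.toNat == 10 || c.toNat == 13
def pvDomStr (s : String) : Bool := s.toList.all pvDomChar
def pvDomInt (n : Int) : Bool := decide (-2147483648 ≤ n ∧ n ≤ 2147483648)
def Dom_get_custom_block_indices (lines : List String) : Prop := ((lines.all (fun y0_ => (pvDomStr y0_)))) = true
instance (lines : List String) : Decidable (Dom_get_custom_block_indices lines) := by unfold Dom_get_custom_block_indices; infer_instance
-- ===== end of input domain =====

-- B replaces A's single forward pass (overwriting begin_index) by a forward scan for the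
-- first END_TAG line followed by a backward scan from it for the last BEGIN_TAG line;
-- same results, objective: alternative decomposition.

def pvBEGIN : String := "#custom-my-ap-begin"
def pvEND : String := "#custom-my-ap-end"

-- ===== PORT A =====
-- the for-loop of A, state: begin_index, current index i
def pvLoopA : Option Int → Int → List String → Option Int × Option Int
  | bi, _, [] => (bi, none)
  | bi, i, l :: rest =>
    let bi' := if PySem.Str.isIn pvBEGIN l then some i else bi
    if PySem.Str.isIn pvEND l then (bi', some i) else pvLoopA bi' (i + 1) rest

def get_custom_block_indices (lines : List String) : Option Int × Option Int :=
  pvLoopA none 0 lines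

-- ===== PORT B =====
def get_custom_block_indices_alt (lines : List String) : Option Int × Option Int :=
  -- next((i for i, line in enumerate(lines) if END_TAG in line), None)
  let end_index := ((PySem.List.enumerate lines).find?
      (fun p => PySem.Str.isIn pvEND p.2)).map (fun p => p.1)
  let upper : Int := match end_index with
    | some j => j
    | none => PySem.List.len lines - 1
  -- B's second loop: for i in range(upper, -1, -1): … break  ≡ find? over the countdown range
  let begin_index :=
    (PySem.List.pyRange upper (-1) (-1)).find?
      (fun i => PySem.Str.isIn pvBEGIN (PySem.List.pyGetD lines i ""))
  (begin_index, end_index)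

-- ===== PRECONDITION & SPEC =====
def Spec_get_custom_block_indices (lines : List String) (out : Option Int × Option Int) : Prop := out = get_custom_block_indices_alt lines
instance (lines : List String) (out : Option Int × Option Int) : Decidable (Spec_get_custom_block_indices lines out) := by unfold Spec_get_custom_block_indices; infer_instance

-- ===== CLAIM (what is proved, stated in full; the proofs are below) =====
def Claim_equal_get_custom_block_indices : Prop := ∀ (lines : List String), Dom_get_custom_block_indices lines → Spec_get_custom_block_indices lines (get_custom_block_indices lines)

-- ===== LEMMAS AND PROOFS =====

-- proof-only helper: first index (counted from i) of an element containing END_TAG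
def pvFindEnd : Int → List String → Option Int
  | _, [] => none
  | i, l :: rest => if PySem.Str.isIn pvEND l then some i else pvFindEnd (i + 1) rest

theorem pvFindEnd_eq (xs : List String) (i : Int) :
    ((PySem.List.enumerate xs i).find?
        (fun p => PySem.Str.isIn pvEND p.2)).map (fun p => p.1) = pvFindEnd i xs := by
  induction xs generalizing i with
  | nil => simp [PySem.List.enumerate_nil, pvFindEnd]
  | cons l t ih =>
      rw [PySem.List.enumerate_cons]
      by_cases hq : PySem.Chars.isIn pvEND.toList l.toList
      · simp [pvFindEnd, hq]
      · simp [pvFindEnd, hq]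
        simpa using ih (i + 1)

-- last index (counted from i) of an element containing BEGIN_TAG; proof-only helper
def pvLastP : Int → List String → Option Int
  | _, [] => none
  | i, l :: rest =>
    ((pvLastP (i + 1) rest).or (if PySem.Str.isIn pvBEGIN l then some i else none))

theorem pvLastP_append (i : Int) (xs ys : List String) :
    pvLastP i (xs ++ ys) = (pvLastP (i + xs.length) ys).or (pvLastP i xs) := by
  induction xs generalizing i with
  | nil => simp [pvLastP]
  | cons l t ih =>
      simp only [List.cons_append, pvLastP, ih (i + 1), List.length_cons]
      rw [Option.or_assoc]
      congr 2
      push_cast; ring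

theorem pvFindEnd_some_bounds (xs : List String) (i j : Int)
    (h : pvFindEnd i xs = some j) : i ≤ j ∧ j < i + xs.length := by
  induction xs generalizing i with
  | nil => simp [pvFindEnd] at h
  | cons l t ih =>
      simp only [pvFindEnd] at h
      split at h
      · cases h; simp
      · have := ih (i + 1) h
        simp only [List.length_cons]
        push_cast
        omega

-- A's loop computed from B's pieces
theorem pvLoopA_char (xs : List String) (bi : Option Int) (i : Int) :
    pvLoopA bi i xs =
      match pvFindEnd i xs with
      | some j => ((pvLastP i (xs.take (j - i + 1).toNat)).or bi, some j)
      | none => ((pvLastP i xs).or bi, none) := by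
  induction xs generalizing bi i with
  | nil => simp [pvLoopA, pvFindEnd, pvLastP]
  | cons l t ih =>
      by_cases hq : PySem.Str.isIn pvEND l
      · simp only [pvLoopA, pvFindEnd, hq, if_true]
        have h1 : (i - i + 1).toNat = 1 := by omega
        simp only [h1, List.take_succ_cons, List.take_zero]
        by_cases hp : PySem.Chars.isIn pvBEGIN.toList l.toList <;>
          simp [pvLastP, hp]
      · simp only [pvLoopA, pvFindEnd, if_neg hq]
        rw [ih]
        cases he : pvFindEnd (i + 1) t with
        | none =>
            by_cases hp : PySem.Chars.isIn pvBEGIN.toList l.toList <;>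
              simp [pvLastP, hp]
        | some j =>
            have hb := pvFindEnd_some_bounds t (i + 1) j he
            have h2 : (j - i + 1).toNat = (j - (i + 1) + 1).toNat + 1 := by omega
            simp only [h2, List.take_succ_cons]
            by_cases hp : PySem.Chars.isIn pvBEGIN.toList l.toList <;>
              simp [pvLastP, hp]

-- B's backward scan computed as pvLastP of the prefix
theorem pvBackScan_char (xs : List String) (u : Int) (h0 : -1 ≤ u)
    (h1 : u < xs.length) :
    (PySem.List.pyRange u (-1) (-1)).find?
        (fun t => PySem.Str.isIn pvBEGIN (PySem.List.pyGetD xs t "")) =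
      pvLastP 0 (xs.take (u + 1).toNat) := by
  generalize hn : (u + 1).toNat = n
  induction n generalizing u with
  | zero =>
      have hu : u = -1 := by omega
      subst hu
      rw [PySem.List.pyRange_neg_one_eq_nil (by omega)]
      simp [pvLastP]
  | succ n ih =>
      have hu0 : 0 ≤ u := by omega
      rw [PySem.List.pyRange_neg_one_cons (by omega)]
      have hun : u = (n : Int) := by omega
      have hnlt : n < xs.length := by omega
      have htake : xs.take (n + 1) = xs.take n ++ [xs[n]] := by
        rw [List.take_add_one, List.getElem?_eq_getElem hnlt]
        rfl
      have hget : PySem.List.pyGetD xs u "" = xs[n] := by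
        rw [hun, PySem.List.pyGetD_natCast]
        exact List.getD_eq_getElem xs "" hnlt
      have hlen : (0 : Int) + ((xs.take n).length : Int) = (n : Int) := by
        simp [List.length_take]
        omega
      simp only [List.find?_cons, hget, htake, pvLastP_append, hlen]
      by_cases hp : PySem.Chars.isIn pvBEGIN.toList xs[n].toList
      · simp [pvLastP, hp, hun]
      · have hrec := ih (u - 1) (by omega) (by omega) (by omega)
        simp [pvLastP, hp]
        simpa using hrec

-- ===== VERDICT (by name: the statement is the Claim_ definition above) =====
theorem get_custom_block_indices_spec : Claim_equal_get_custom_block_indices := by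
  intro lines _
  unfold Spec_get_custom_block_indices
  unfold get_custom_block_indices get_custom_block_indices_alt
  rw [pvLoopA_char]
  simp only [pvFindEnd_eq]
  have hl : PySem.List.len lines = (lines.length : Int) := by
    simp [PySem.List.len_eq]
  cases he : pvFindEnd 0 lines with
  | none =>
      simp only
      rw [pvBackScan_char lines (PySem.List.len lines - 1) (by rw [hl]; omega)
            (by rw [hl]; omega)]
      have ht : ((PySem.List.len lines - 1 + 1).toNat) = lines.length := by
        rw [hl]; omega
      rw [ht, List.take_length, Option.or_none]
  | some j =>
      have hb := pvFindEnd_some_bounds lines 0 j he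
      simp only
      rw [pvBackScan_char lines j (by omega) (by omega)]
      have ht : (j - 0 + 1).toNat = (j + 1).toNat := by omega
      rw [ht, Option.or_none]
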